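-- pv_equiv track=rewrite | github.com/EdVinyard/SpaceWar-X16 | mirror.py | mirror_diagonally
-- ===== SOURCE A (Python) =====
-- import math
-- from typing import Callable, Iterable, Sequence, TypeAlias
--
-- X16Image: TypeAlias = Sequence[int]
--
-- def square_dimension(image: X16Image) -> int:
--     '''
--     Assume `image` represents an image of equal width and height.  Calculate and
--     return the width/height of the image.  Raise `ValueError` if the image
--     cannot be square.
--     '''
--     image_len = len(image)
--
--     if image_len == 0:
--         raise ValueError('image cannot be empty')
--
--     square_size = math.floor(math.sqrt(image_len))
--
--     if square_size**2 != image_len: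
--         raise ValueError(f'image of {image_len} bytes cannot be square')
--
--     return square_size
--
-- def mirror_diagonally(image: X16Image) -> X16Image:
--     '''
--     Mirror the image around a diagonal line that bisects the image, running from
--     the bottom-left to the top-right.  For example:
--
--     ```
--         INPUT       OUTPUT
--         1 2 3       9 6 3
--         4 5 6       8 5 2
--         7 8 9       7 4 1
--     '''
--     dim = square_dimension(image)
--     result = []
--     for mirrored_row in range(dim):
--         for mirrored_col in range(dim):
--             original_row = dim - mirrored_col - 1
--             original_col = dim - mirrored_row - 1
--             index = original_row * dim + original_col
--             result.append(image[index])
--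
--     return result
-- ===== SOURCE B (Python) =====
-- import math
-- from typing import Sequence, TypeAlias
--
-- X16Image: TypeAlias = Sequence[int]
--
-- def square_dimension(image: X16Image) -> int:
--     image_len = len(image)
--     if image_len == 0:
--         raise ValueError('image cannot be empty')
--     square_size = math.floor(math.sqrt(image_len))
--     if square_size**2 != image_len:
--         raise ValueError(f'image of {image_len} bytes cannot be square')
--     return square_size
--
-- def mirror_diagonally(image: X16Image) -> X16Image:
--     '''
--     Anti-diagonal mirror, staged: rotate the image 180 degrees by reversing the
--     flat buffer, cut the rotated buffer into its rows, transpose the grid of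
--     rows with zip, and flatten.  No per-cell index arithmetic.
--     '''
--     dim = square_dimension(image)
--     rotated = list(image)[::-1]
--     rows = [rotated[i * dim:(i + 1) * dim] for i in range(dim)]
--     return [x for col in zip(*rows) for x in col]
-- ===== Notes on version B (the rewrite author's own statement) =====
-- stated objective: alternative
-- what changed: B works on a grid of rows instead of per-cell index arithmetic: it rotates the flat image 180 degrees by reversing it, slices the rotated buffer into dim rows, transposes that list of rows with zip(*rows), and flattens, whereas A computes an original_row/original_col flat index for every output cell inside nested loops.
import Mathlib
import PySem

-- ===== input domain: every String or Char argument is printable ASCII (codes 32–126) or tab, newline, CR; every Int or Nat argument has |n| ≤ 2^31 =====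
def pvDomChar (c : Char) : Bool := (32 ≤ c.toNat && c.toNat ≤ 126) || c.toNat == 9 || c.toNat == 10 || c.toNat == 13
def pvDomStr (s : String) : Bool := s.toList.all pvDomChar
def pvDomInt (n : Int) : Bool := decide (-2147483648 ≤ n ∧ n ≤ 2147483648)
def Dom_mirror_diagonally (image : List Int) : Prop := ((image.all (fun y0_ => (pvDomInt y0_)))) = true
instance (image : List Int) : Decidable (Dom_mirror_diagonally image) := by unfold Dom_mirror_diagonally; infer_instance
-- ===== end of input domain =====

-- B replaces A's per-cell original_row/original_col flat-index arithmetic by a staged row-level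
-- algorithm: reverse the flat image (180-degree rotation), slice it into rows, transpose the list
-- of rows with zip(*rows), flatten; objective: alternative.

-- ===== PORT A =====
-- square_dimension: math.floor(math.sqrt(image_len)) is exactly Nat.sqrt on these list lengths
def pvSquareDimension (image : List Int) : Nat := Nat.sqrt image.length

def mirror_diagonally (image : List Int) : List Int :=
  let dim : Int := (pvSquareDimension image : Int)
  (PySem.List.pyRange 0 dim 1).foldl (fun result mirrored_row =>
    (PySem.List.pyRange 0 dim 1).foldl (fun result mirrored_col =>
      let original_row := dim - mirrored_col - 1
      let original_col := dim - mirrored_row - 1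
      let index := original_row * dim + original_col
      result ++ [PySem.List.pyGetD image index 0]) result) []

-- ===== PORT B =====
-- zip(*rows): repeatedly emit the heads of all rows while every row is nonempty (Python's zip
-- stops at the first exhausted iterator; zip() of no iterables is empty).  Hand-ported, exact
-- under its own guard: headD/tail are only read while every row is nonempty.
def pvZipStar (rows : List (List Int)) : List (List Int) :=
  if h : rows ≠ [] ∧ ∀ row ∈ rows, row ≠ [] then
    rows.map (fun row => row.headD 0) :: pvZipStar (rows.map List.tail)
  else []
termination_by ((rows.headD []).length)
decreasing_by
  obtain ⟨hne, hall⟩ := h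
  cases rows with
  | nil => exact absurd rfl hne
  | cons a rest =>
    have ha : a ≠ [] := hall a (List.mem_cons_self)
    have : 0 < a.length := List.length_pos_iff.mpr ha
    simp [List.length_tail]
    omega

def mirror_diagonally_alt (image : List Int) : List Int :=
  let dim : Int := (pvSquareDimension image : Int)
  let rotated : List Int := image.reverse        -- list(image)[::-1]
  let rows : List (List Int) :=
    (PySem.List.pyRange 0 dim 1).map (fun i =>
      PySem.List.slice rotated (some (i * dim)) (some ((i + 1) * dim)))
  ((pvZipStar rows).flatten)                     -- [x for col in zip(*rows) for x in col]

-- ===== PRECONDITION & SPEC =====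
-- Pre_ excludes exactly the inputs on which square_dimension raises ValueError:
-- the empty image and images whose length is not a perfect square.
def Pre_mirror_diagonally (image : List Int) : Prop :=
  image.length ≠ 0 ∧ ∃ d ≤ image.length, d * d = image.length
instance (image : List Int) : Decidable (Pre_mirror_diagonally image) := by
  unfold Pre_mirror_diagonally; infer_instance

def pvWitness_mirror_diagonally : List Int := [1, 2, 3, 4, 5, 6, 7, 8, 9]

def Spec_mirror_diagonally (image : List Int) (out : List Int) : Prop := out = mirror_diagonally_alt image
instance (image : List Int) (out : List Int) : Decidable (Spec_mirror_diagonally image out) := by unfold Spec_mirror_diagonally; infer_instance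

-- ===== CLAIM (what is proved, stated in full; the proofs are below) =====
def Claim_equal_mirror_diagonally : Prop := ∀ (image : List Int), Dom_mirror_diagonally image → Pre_mirror_diagonally image → Spec_mirror_diagonally image (mirror_diagonally image)

-- ===== LEMMAS AND PROOFS =====

-- cell agreement: A's read of image at (dim-c-1)*dim + (dim-r-1) is the read of the
-- reversed image at c*dim + r, for a dim*dim image
lemma pv_elem_eq (image : List Int) (d c r : Nat) (hc : c < d) (hr : r < d)
    (hl : image.length = d * d) :
    PySem.List.pyGetD image (((d : Int) - c - 1) * d + ((d : Int) - r - 1)) 0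
      = image.reverse.getD (c * d + r) 0 := by
  have hidx : c * d + r + 1 ≤ d * d := by nlinarith
  have hcast : ((d : Int) - c - 1) * d + ((d : Int) - r - 1)
      = ((d * d - 1 - (c * d + r) : Nat) : Int) := by
    have h2 : ((d * d - 1 - (c * d + r) : Nat) : Int)
        = ((d * d : Nat) : Int) - 1 - ((c * d + r : Nat) : Int) := by omega
    rw [h2]; push_cast; ring
  rw [hcast, PySem.List.pyGetD_natCast]
  have hb : c * d + r < image.reverse.length := by simp [hl]; omega
  have hb2 : d * d - 1 - (c * d + r) < image.length := by omega
  rw [List.getD_eq_getElem _ _ hb, List.getD_eq_getElem _ _ hb2, List.getElem_reverse]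
  congr 1
  simp [hl]

-- A's nested append-folds, unfolded into a flatMap of maps over Nat ranges
lemma pv_a_eq_flatMap (image : List Int) (d : Nat) (hd : pvSquareDimension image = d) :
    mirror_diagonally image
      = (List.range d).flatMap (fun (r : Nat) => (List.range d).map (fun (c : Nat) =>
          PySem.List.pyGetD image (((d : Int) - (c : Int) - 1) * d + ((d : Int) - (r : Int) - 1)) 0)) := by
  simp only [mirror_diagonally, hd, PySem.List.pyRange_zero_nat, List.foldl_map,
    PySem.List.foldl_append_singleton_eq_map, PySem.List.foldl_append_eq_flatMap,
    List.nil_append]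

-- zip(*rows) on a nonempty list of equal-length rows is the transpose:
-- row r of the result collects entry r of every row
lemma pv_zipStar_eq (k : Nat) : ∀ rows : List (List Int), rows ≠ [] →
    (∀ row ∈ rows, row.length = k) →
    pvZipStar rows = (List.range k).map (fun r => rows.map (fun row => row.getD r 0)) := by
  induction k with
  | zero =>
    intro rows hne hlen
    rw [pvZipStar.eq_def]
    rw [dif_neg]
    · simp
    · intro ⟨_, hall⟩
      cases rows with
      | nil => exact hne rfl
      | cons a rest =>
        exact hall a (List.mem_cons_self) (List.eq_nil_of_length_eq_zero
          (hlen a (List.mem_cons_self)))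
  | succ k ih =>
    intro rows hne hlen
    have hall : ∀ row ∈ rows, row ≠ [] := by
      intro row hr he
      have := hlen row hr
      simp [he] at this
    rw [pvZipStar.eq_def, dif_pos ⟨hne, hall⟩]
    rw [ih (rows.map List.tail) (by simpa using hne)
      (by intro row hr
          obtain ⟨row', hr', rfl⟩ := List.mem_map.mp hr
          have := hlen row' hr'
          simp [List.length_tail, this])]
    rw [List.range_succ_eq_map]
    simp only [List.map_cons, List.map_map]
    congr 1
    · apply List.map_congr_left
      intro row hr
      cases row with
      | nil => exact absurd rfl (hall _ hr)
      | cons x xs => simp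
    · apply List.map_congr_left
      intro r _
      simp only [Function.comp]
      apply List.map_congr_left
      intro row hr
      cases row with
      | nil => exact absurd rfl (hall _ hr)
      | cons x xs => simp

-- B's rows: slicing the reversed image yields the drop/take chunks
lemma pv_rows_eq (rev : List Int) (d : Nat) :
    (PySem.List.pyRange 0 ((d : Nat) : Int) 1).map (fun i =>
        PySem.List.slice rev (some (i * (d : Int))) (some ((i + 1) * (d : Int))))
      = (List.range d).map (fun c => (rev.drop (c * d)).take d) := by
  rw [PySem.List.pyRange_zero_nat, List.map_map]
  apply List.map_congr_left
  intro c _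
  have h1 : ((c : Int)) * (d : Int) = ((c * d : Nat) : Int) := by push_cast; ring
  have h2 : ((c : Int) + 1) * (d : Int) = ((c * d : Nat) : Int) + ((d : Nat) : Int) := by
    push_cast; ring
  simp only [Function.comp, h1, h2, PySem.List.slice_natCast_add]

-- reading entry r of chunk c of rev is reading rev at c*d+r
lemma pv_chunk_getD (rev : List Int) (d c r : Nat) (hr : r < d) :
    ((rev.drop (c * d)).take d).getD r 0 = rev.getD (c * d + r) 0 := by
  rw [List.getD_eq_getElem?_getD, List.getD_eq_getElem?_getD,
    List.getElem?_take_of_lt hr, List.getElem?_drop]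

-- ===== VERDICT (by name: the statement is the Claim_ definition above) =====
theorem mirror_diagonally_spec : Claim_equal_mirror_diagonally := by
  intro image _ hpre
  obtain ⟨hne0, d, -, hdd⟩ := hpre
  have hds : pvSquareDimension image = d := by
    unfold pvSquareDimension; rw [← hdd]; rw [← pow_two]; exact Nat.sqrt_eq' d
  have hdpos : 0 < d := by
    rcases Nat.eq_zero_or_pos d with h | h
    · subst h; simp at hdd; exact absurd hdd.symm hne0
    · exact h
  unfold Spec_mirror_diagonally
  rw [pv_a_eq_flatMap image d hds]
  simp only [mirror_diagonally_alt, hds]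
  rw [pv_rows_eq image.reverse d]
  rw [pv_zipStar_eq d _ (by simp [List.range_eq_nil]; omega)
    (by intro row hr
        obtain ⟨c, hc, rfl⟩ := List.mem_map.mp hr
        have hc' : c < d := List.mem_range.mp hc
        rw [List.length_take, List.length_drop, List.length_reverse, ← hdd]
        have : c * d + d ≤ d * d := by nlinarith
        omega)]
  rw [← List.flatMap_def]
  apply List.flatMap_congr
  intro r hr
  rw [List.map_map]
  apply List.map_congr_left
  intro c hc
  have hc' : c < d := List.mem_range.mp hc
  have hr' : r < d := List.mem_range.mp hr
  rw [Function.comp, pv_chunk_getD image.reverse d c r hr']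
  exact pv_elem_eq image d c r hc' hr' hdd.symm
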